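-- pv_equiv track=rewrite | github.com/xihaopark/Agent-complexity | main/finish/workflow_candidates/gersteinlab__ASTRO/python/ASTRO/countfeature.py | summarize_matrix_with_per_pixel
-- ===== SOURCE A (Python) =====
-- def summarize_matrix_with_per_pixel(matrix):
--     genes_per_pixel = {}
--     count_per_pixel = {}
--
--     for key, cnt in matrix.items():
--         pos, genes = key.rsplit('_', 1)
--         count_per_pixel[pos] = count_per_pixel.get(pos, 0) + cnt
--         if '-' not in genes:
--             if pos not in genes_per_pixel:
--                 genes_per_pixel[pos] = set()
--             genes_per_pixel[pos].add(genes)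
--
--     genes_per_stats = {pos: len(gset) for pos, gset in genes_per_pixel.items()}
--     return genes_per_stats, count_per_pixel
-- ===== SOURCE B (Python) =====
-- def summarize_matrix_with_per_pixel(matrix):
--     # Parse every key once, then derive each output by its own group-then-aggregate pass.
--     parsed = [(*key.rsplit('_', 1), cnt) for key, cnt in matrix.items()]
--
--     # counts: gather each pixel's counts into a list, then total each group
--     count_rows = {}
--     for pos, _, cnt in parsed:
--         count_rows.setdefault(pos, []).append(cnt)
--     count_per_pixel = {pos: sum(cs) for pos, cs in count_rows.items()}
--
--     # genes: dedupe the valid (pos, gene) pairs globally, then tally pairs per pixel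
--     distinct_pairs = dict.fromkeys((pos, g) for pos, g, _ in parsed if '-' not in g)
--     genes_per_stats = {}
--     for pos, _ in distinct_pairs:
--         genes_per_stats[pos] = genes_per_stats.get(pos, 0) + 1
--     return genes_per_stats, count_per_pixel
-- ===== Notes on version B (the rewrite author's own statement) =====
-- stated objective: alternative
-- what changed: Replaces the single scatter loop that incrementally maintains two result dicts (a running count and a per-pixel gene set) by parse-once then two independent group-then-aggregate passes: counts are gathered into per-pixel lists and summed afterwards, and gene statistics are obtained by globally deduplicating the valid (pos, gene) pairs and tallying pairs per pixel, so no per-pixel set objects are ever built.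
import Mathlib
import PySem

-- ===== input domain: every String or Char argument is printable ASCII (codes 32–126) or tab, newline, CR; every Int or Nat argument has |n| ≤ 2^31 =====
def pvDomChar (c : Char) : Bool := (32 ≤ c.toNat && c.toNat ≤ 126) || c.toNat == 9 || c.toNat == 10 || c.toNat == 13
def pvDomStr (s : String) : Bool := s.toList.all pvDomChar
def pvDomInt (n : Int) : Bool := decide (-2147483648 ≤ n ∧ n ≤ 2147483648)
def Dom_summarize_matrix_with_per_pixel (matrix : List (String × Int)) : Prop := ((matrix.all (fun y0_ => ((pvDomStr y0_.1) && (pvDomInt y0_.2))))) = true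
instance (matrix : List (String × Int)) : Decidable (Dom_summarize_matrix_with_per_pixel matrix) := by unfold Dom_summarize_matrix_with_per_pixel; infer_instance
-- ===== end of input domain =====

-- B replaces A's scatter loop (incrementally maintaining both result dicts and per-pixel gene
-- sets) by parse-once then two independent group-then-aggregate passes; objective: alternative
-- (same asymptotic cost, no speed claim).

-- ===== PORT A =====
-- shared helper: key.rsplit('_', 1) unpacked into exactly two pieces; none = no '_' in key,
-- where Python's two-name unpacking raises ValueError (excluded by Pre_). Exact: splits at the
-- LAST '_' of the key.
def pvRsplitU : List Char → Option (List Char × List Char)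
  | [] => none
  | c :: rest =>
    match pvRsplitU rest with
    | some pg => some (c :: pg.1, pg.2)
    | none => if c = '_' then some ([], rest) else none

def pvParse? (key : String) : Option (String × String) :=
  (pvRsplitU key.toList).map (fun pg => (String.ofList pg.1, String.ofList pg.2))

-- literal port of A: one loop over the dict items maintaining (genes_per_pixel, count_per_pixel);
-- Python's two-step "if pos not in genes_per_pixel: genes_per_pixel[pos] = set()" followed by the
-- in-place "genes_per_pixel[pos].add(genes)" is exactly Dict.modify pos ∅ (·.add genes)
-- (update in place when present, append when absent); the none branch of the parse is where
-- Python raises (excluded by Pre_), the state is returned unchanged there.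
def summarize_matrix_with_per_pixel (matrix : List (String × Int)) : (List (String × Int)) × (List (String × Int)) :=
  let st := matrix.foldl
    (fun (st : PySem.Dict String (PySem.Set String) × PySem.Dict String Int) kv =>
      match pvParse? kv.1 with
      | none => st
      | some pg =>
        let cpp := st.2.insert pg.1 (st.2.getD pg.1 0 + kv.2)
        let gpp := if PySem.Str.isIn "-" pg.2 then st.1
                   else st.1.modify pg.1 PySem.Set.empty (fun s => s.add pg.2)
        (gpp, cpp))
    (PySem.Dict.empty, PySem.Dict.empty)
  (st.1.items.map (fun pg => (pg.1, PySem.Set.len pg.2)), st.2.items)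

-- ===== PORT B =====
-- literal port of Source B: parse every key once (an entry whose key lacks '_' would raise in
-- Python — excluded by Pre_ — and is dropped here), then two independent group-then-aggregate
-- passes: counts gathered into per-pixel lists and summed, and gene stats from the globally
-- deduplicated valid (pos, gene) pairs tallied per pixel (dict.fromkeys = PySem.List.dedup).
def summarize_matrix_with_per_pixel_alt (matrix : List (String × Int)) : (List (String × Int)) × (List (String × Int)) :=
  let parsed : List (String × String × Int) :=
    matrix.filterMap (fun kv => (pvParse? kv.1).map (fun pg => (pg.1, pg.2, kv.2)))
  let countRows := parsed.foldl
    (fun d t => d.modify t.1 [] (fun cs => cs ++ [t.2.2])) PySem.Dict.empty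
  let count_per_pixel := countRows.items.map (fun pr => (pr.1, pr.2.sum))
  let distinctPairs := PySem.List.dedup
    ((parsed.filter (fun t => !(PySem.Str.isIn "-" t.2.1))).map (fun t => (t.1, t.2.1)))
  let genes_per_stats := distinctPairs.foldl
    (fun d pg => d.insert pg.1 (d.getD pg.1 0 + 1)) PySem.Dict.empty
  (genes_per_stats.items, count_per_pixel)

-- ===== PRECONDITION & SPEC =====
-- Pre_ excludes (a) keys without '_', on which A's two-name unpacking of rsplit raises
-- ValueError (B raises there too), and (b) duplicate keys, which a Python dict argument cannot
-- have (the association list represents dict insertion order, so its keys are distinct).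
def Pre_summarize_matrix_with_per_pixel (matrix : List (String × Int)) : Prop :=
  (∀ kv ∈ matrix, PySem.Str.isIn "_" kv.1 = true) ∧ (matrix.map Prod.fst).Nodup
instance (matrix : List (String × Int)) : Decidable (Pre_summarize_matrix_with_per_pixel matrix) := by
  unfold Pre_summarize_matrix_with_per_pixel; infer_instance

def pvWitness_summarize_matrix_with_per_pixel : (List (String × Int)) :=
  [("12x34_ACTG", 3), ("12x34_AC-TG", 2), ("7x9_ACTG", 1)]

def Spec_summarize_matrix_with_per_pixel (matrix : List (String × Int)) (out : (List (String × Int)) × (List (String × Int))) : Prop := out = summarize_matrix_with_per_pixel_alt matrix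
instance (matrix : List (String × Int)) (out : (List (String × Int)) × (List (String × Int))) : Decidable (Spec_summarize_matrix_with_per_pixel matrix out) := by unfold Spec_summarize_matrix_with_per_pixel; infer_instance

-- ===== CLAIM (what is proved, stated in full; the proofs are below) =====
def Claim_equal_summarize_matrix_with_per_pixel : Prop := ∀ (matrix : List (String × Int)), Dom_summarize_matrix_with_per_pixel matrix → Pre_summarize_matrix_with_per_pixel matrix → Spec_summarize_matrix_with_per_pixel matrix (summarize_matrix_with_per_pixel matrix)

-- ===== LEMMAS AND PROOFS =====

theorem pv_add_of_mem {α : Type} [BEq α] [LawfulBEq α] (s : PySem.Set α) (y : α) (h : y ∈ s) :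
    s.add y = s := by
  simp [PySem.Set.add, PySem.Set.contains, h]

theorem pv_add_of_not_mem {α : Type} [BEq α] [LawfulBEq α] (s : PySem.Set α) (y : α) (h : y ∉ s) :
    s.add y = s ++ [y] := by
  simp [PySem.Set.add, PySem.Set.contains, h]

theorem pv_ofList_append {α : Type} [BEq α] (M : List α) (y : α) :
    PySem.Set.ofList (M ++ [y]) = (PySem.Set.ofList M).add y := by
  simp [PySem.Set.ofList_eq_foldl, List.foldl_append]

-- ordered dedup over a right-append
theorem pv_dedup_append {α : Type} [BEq α] [LawfulBEq α] (L : List α) (x : α) :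
    PySem.Set.ofList (L ++ [x]) =
      if x ∈ L then PySem.Set.ofList L else PySem.Set.ofList L ++ [x] := by
  rw [pv_ofList_append]
  by_cases h : x ∈ L
  · rw [if_pos h, pv_add_of_mem _ _ ((PySem.Set.mem_ofList L x).mpr h)]
  · rw [if_neg h, pv_add_of_not_mem _ _ (fun hc => h ((PySem.Set.mem_ofList L x).mp hc))]

-- ordered dedup commutes with filter (duplicates are equal, so they agree on the predicate)
theorem pv_dedup_filter {α : Type} [BEq α] [LawfulBEq α] (q : α → Bool) (L : List α) :
    (PySem.Set.ofList L).filter q = PySem.Set.ofList (L.filter q) := by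
  induction L using List.reverseRecOn with
  | nil => simp [PySem.Set.ofList]
  | append_singleton L x ih =>
    rw [pv_dedup_append, List.filter_append]
    by_cases hx : x ∈ L
    · rw [if_pos hx, ih]
      by_cases hq : q x = true
      · have hfx : List.filter q [x] = [x] := by simp [hq]
        rw [hfx, pv_dedup_append, if_pos (List.mem_filter.mpr ⟨hx, hq⟩)]
      · simp [hq]
    · rw [if_neg hx, List.filter_append, ih]
      by_cases hq : q x = true
      · have hfx : List.filter q [x] = [x] := by simp [hq]
        rw [hfx, pv_dedup_append, if_neg (fun hc => hx (List.mem_filter.mp hc).1)]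
      · simp [hq]

-- first-occurrence order of the f-images of a dedup'd list is that of the original list
theorem pv_ofList_map_dedup {α β : Type} [BEq α] [LawfulBEq α] [BEq β] [LawfulBEq β]
    (f : α → β) (L : List α) :
    PySem.Set.ofList ((PySem.Set.ofList L).map f) = PySem.Set.ofList (L.map f) := by
  induction L using List.reverseRecOn with
  | nil => simp [PySem.Set.ofList]
  | append_singleton L x ih =>
    rw [pv_dedup_append]
    by_cases hx : x ∈ L
    · rw [if_pos hx, ih, List.map_append, List.map_singleton, pv_ofList_append]
      exact (pv_add_of_mem _ _ (by rw [PySem.Set.mem_ofList]; exact List.mem_map_of_mem hx)).symm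
    · rw [if_neg hx, List.map_append, List.map_singleton, List.map_append, List.map_singleton,
        pv_ofList_append, pv_ofList_append, ih]

-- ordered dedup commutes with pairing against a fixed first component (an injective map)
theorem pv_dedup_map_pair {α : Type} [BEq α] [LawfulBEq α] (p : String) (L : List α) :
    PySem.Set.ofList (L.map (fun g => ((p, g) : String × α))) =
      (PySem.Set.ofList L).map (fun g => (p, g)) := by
  induction L using List.reverseRecOn with
  | nil => simp [PySem.Set.ofList]
  | append_singleton L x ih =>
    rw [List.map_append, List.map_singleton, pv_dedup_append, pv_dedup_append]
    by_cases hx : x ∈ L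
    · have hx' : ((p, x) : String × α) ∈ L.map (fun g => (p, g)) := List.mem_map_of_mem hx
      rw [if_pos hx', if_pos hx, ih]
    · have hx' : ((p, x) : String × α) ∉ L.map (fun g => (p, g)) := by
        intro hc
        obtain ⟨a, ha, he⟩ := List.mem_map.mp hc
        exact hx ((Prod.mk.injEq _ _ _ _ ▸ he).2 ▸ ha)
      rw [if_neg hx', if_neg hx, List.map_append, List.map_singleton, ih]

-- getD after a keyed insert-accumulate loop: running total of the matching values
theorem pv_getD_foldl_insert_sum {β : Type} (l : List β) (k : β → String) (v : β → Int)
    (d : PySem.Dict String Int) (p : String) :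
    (l.foldl (fun d t => d.insert (k t) (d.getD (k t) 0 + v t)) d).getD p 0
      = d.getD p 0 + ((l.filter (fun t => k t == p)).map v).sum := by
  induction l generalizing d with
  | nil => simp
  | cons t rest ih =>
    simp only [List.foldl_cons, ih, List.filter_cons]
    by_cases h : k t = p
    · simp only [h, beq_self_eq_true, if_pos, List.map_cons, List.sum_cons,
        PySem.Dict.getD_insert]
      ring
    · have h' : ¬ (p = k t) := fun hc => h hc.symm
      simp [h, h', PySem.Dict.getD_insert]

-- getD after a keyed group-into-lists loop: the matching values in order
theorem pv_getD_foldl_modify_append' {β : Type} (l : List β) (k : β → String) (v : β → Int)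
    (d : PySem.Dict String (List Int)) (p : String) :
    (l.foldl (fun d t => d.modify (k t) [] (fun cs => cs ++ [v t])) d).getD p []
      = d.getD p [] ++ (l.filter (fun t => k t == p)).map v := by
  induction l generalizing d with
  | nil => simp
  | cons t rest ih =>
    simp only [List.foldl_cons, ih, List.filter_cons]
    by_cases h : k t = p
    · simp [h]
    · have h' : ¬ (p = k t) := fun hc => h hc.symm
      simp [h, h', PySem.Dict.getD_modify]

-- getD after a keyed set-accumulate loop: the matching values folded into the set in order
theorem pv_getD_foldl_modify_add {β : Type} (l : List β) (k : β → String) (g : β → String)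
    (d : PySem.Dict String (PySem.Set String)) (p : String) :
    (l.foldl (fun d t => d.modify (k t) PySem.Set.empty (fun s => s.add (g t))) d).getD p PySem.Set.empty
      = PySem.Set.update (d.getD p PySem.Set.empty) ((l.filter (fun t => k t == p)).map g) := by
  induction l generalizing d with
  | nil => simp [PySem.Set.update]
  | cons t rest ih =>
    simp only [List.foldl_cons, ih, List.filter_cons]
    by_cases h : k t = p
    · simp [h, PySem.Set.update]
    · have h' : ¬ (p = k t) := fun hc => h hc.symm
      simp [h, h', PySem.Dict.getD_modify]

-- A's count loop (scatter getD+insert) produces the same items as B's group-into-lists-then-sum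
theorem pv_count_items (l : List (String × String × Int)) :
    (l.foldl (fun d t => d.insert t.1 (d.getD t.1 0 + t.2.2)) PySem.Dict.empty).items
      = (l.foldl (fun d t => d.modify t.1 [] (fun cs => cs ++ [t.2.2])) PySem.Dict.empty).items.map
          (fun pr => (pr.1, pr.2.sum)) := by
  have hne : (PySem.Dict.empty : PySem.Dict String Int).keys.Nodup := List.nodup_nil
  have hne' : (PySem.Dict.empty : PySem.Dict String (List Int)).keys.Nodup := List.nodup_nil
  have h1 := PySem.Dict.nodup_keys_foldl_insert_key l (fun t => t.1)
    (fun d t => d.getD t.1 0 + t.2.2) PySem.Dict.empty hne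
  have h2 := PySem.Dict.nodup_keys_foldl_modify_key l (fun t => t.1) []
    (fun _ t cs => cs ++ [t.2.2]) PySem.Dict.empty hne'
  rw [PySem.Dict.items_eq_map_keys _ h1 0, PySem.Dict.items_eq_map_keys _ h2 [], List.map_map]
  rw [PySem.Dict.keys_foldl_insert_key, PySem.Dict.keys_foldl_modify_key]
  apply List.map_congr_left
  intro p _
  simp only [Function.comp]
  rw [pv_getD_foldl_insert_sum l (fun t => t.1) (fun t => t.2.2),
    pv_getD_foldl_modify_append' l (fun t => t.1) (fun t => t.2.2)]
  show (p, (0:Int) + _) = (p, ([] ++ List.map _ _ : List Int).sum)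
  simp

-- A's gene-set loop produces, after taking set sizes, the same items as B's
-- dedup-the-valid-pairs-then-tally loop
theorem pv_genes_items (l : List (String × String × Int)) :
    ((l.foldl (fun d t => if PySem.Str.isIn "-" t.2.1 then d
        else d.modify t.1 PySem.Set.empty (fun s => s.add t.2.1)) PySem.Dict.empty).items.map
          (fun pg => (pg.1, PySem.Set.len pg.2)))
      = ((PySem.List.dedup ((l.filter (fun t => !(PySem.Str.isIn "-" t.2.1))).map
            (fun t => (t.1, t.2.1)))).foldl
          (fun d pg => d.insert pg.1 (d.getD pg.1 0 + 1)) PySem.Dict.empty).items := by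
  -- A's conditional scatter is the unconditional scatter over the filtered list
  have hfil : (l.foldl (fun d t => if PySem.Str.isIn "-" t.2.1 then d
        else d.modify t.1 PySem.Set.empty (fun s => s.add t.2.1)) PySem.Dict.empty)
      = ((l.filter (fun t => !(PySem.Str.isIn "-" t.2.1))).foldl
          (fun d t => d.modify t.1 PySem.Set.empty (fun s => s.add t.2.1)) PySem.Dict.empty) := by
    rw [List.foldl_filter]
    congr 1
    funext d t
    cases hb : PySem.Str.isIn "-" t.2.1
    · simp
    · simp
  rw [hfil]
  set vl := l.filter (fun t => !(PySem.Str.isIn "-" t.2.1)) with hvl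
  set pairs := vl.map (fun t => (t.1, t.2.1)) with hpairs
  have hne : (PySem.Dict.empty : PySem.Dict String (PySem.Set String)).keys.Nodup := List.nodup_nil
  have hne' : (PySem.Dict.empty : PySem.Dict String Int).keys.Nodup := List.nodup_nil
  have h1 := PySem.Dict.nodup_keys_foldl_modify_key vl (fun t => t.1) PySem.Set.empty
    (fun _ t s => s.add t.2.1) PySem.Dict.empty hne
  have h2 := PySem.Dict.nodup_keys_foldl_insert_key (PySem.List.dedup pairs) (fun pg => pg.1)
    (fun d pg => d.getD pg.1 0 + 1) PySem.Dict.empty hne'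
  rw [PySem.Dict.items_eq_map_keys _ h1 PySem.Set.empty, PySem.Dict.items_eq_map_keys _ h2 0,
    List.map_map, PySem.Dict.keys_foldl_modify_key, PySem.Dict.keys_foldl_insert_key]
  -- the two key lists agree (first occurrence of a valid pixel)
  have hkeys : PySem.Set.update (PySem.Dict.empty : PySem.Dict String Int).keys
        ((PySem.List.dedup pairs).map (fun pg => pg.1))
      = PySem.Set.update (PySem.Dict.empty : PySem.Dict String (PySem.Set String)).keys
        (vl.map (fun t => t.1)) := by
    show PySem.Set.update [] _ = PySem.Set.update [] _
    rw [PySem.Set.update_nil_left, PySem.Set.update_nil_left, PySem.List.dedup_eq_ofList,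
      pv_ofList_map_dedup, hpairs, List.map_map]
    rfl
  rw [hkeys]
  apply List.map_congr_left
  intro p _
  simp only [Function.comp]
  rw [pv_getD_foldl_modify_add vl (fun t => t.1) (fun t => t.2.1),
    pv_getD_foldl_insert_sum (PySem.List.dedup pairs) (fun pg => pg.1) (fun _ => 1)]
  -- B's tally at p counts the distinct valid genes of pixel p
  have hfp : (PySem.List.dedup pairs).filter (fun pg => pg.1 == p)
      = (PySem.Set.ofList ((vl.filter (fun t => t.1 == p)).map (fun t => t.2.1))).map
          (fun g => (p, g)) := by
    rw [PySem.List.dedup_eq_ofList, pv_dedup_filter, hpairs, List.filter_map]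
    have : (vl.filter ((fun pg => pg.1 == p) ∘ (fun t => (t.1, t.2.1))))
        = vl.filter (fun t => t.1 == p) := by rfl
    rw [this]
    have hm : (vl.filter (fun t => t.1 == p)).map (fun t => ((t.1, t.2.1) : String × String))
        = ((vl.filter (fun t => t.1 == p)).map (fun t => t.2.1)).map (fun g => (p, g)) := by
      rw [List.map_map]
      apply List.map_congr_left
      intro t ht
      have : t.1 = p := by
        have := (List.mem_filter.mp ht).2
        exact eq_of_beq this
      simp [Function.comp, this]
    rw [hm, pv_dedup_map_pair]
  rw [hfp]
  show (p, PySem.Set.len (PySem.Set.update _ _))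
      = (p, (0:Int) + (List.map (fun _ => (1:Int)) _).sum)
  have hupd : PySem.Set.update ((PySem.Dict.empty : PySem.Dict String (PySem.Set String)).getD p
        PySem.Set.empty) ((vl.filter (fun t => t.1 == p)).map (fun t => t.2.1))
      = PySem.Set.ofList ((vl.filter (fun t => t.1 == p)).map (fun t => t.2.1)) := by
    exact PySem.Set.update_nil_left _
  rw [hupd]
  have hsum : ∀ {γ : Type} (M : List γ), (List.map (fun _ => (1:Int)) M).sum = M.length := by
    intro γ M
    induction M with
    | nil => simp
    | cons a M ih =>
      simp only [List.map_cons, List.sum_cons, ih, List.length_cons]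
      push_cast
      ring
  simp only [PySem.Set.len]
  rw [hsum]
  simp

-- the two ports agree on every input list
theorem pv_ports_eq (m : List (String × Int)) :
    summarize_matrix_with_per_pixel m = summarize_matrix_with_per_pixel_alt m := by
  have h1 : m.foldl
      (fun (st : PySem.Dict String (PySem.Set String) × PySem.Dict String Int) kv =>
        match pvParse? kv.1 with
        | none => st
        | some pg =>
          (if PySem.Str.isIn "-" pg.2 then st.1
           else st.1.modify pg.1 PySem.Set.empty (fun s => s.add pg.2),
           st.2.insert pg.1 (st.2.getD pg.1 0 + kv.2)))
      (PySem.Dict.empty, PySem.Dict.empty)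
      = ((m.filterMap (fun kv => (pvParse? kv.1).map (fun pg => (pg.1, pg.2, kv.2)))).foldl
           (fun d t => if PySem.Str.isIn "-" t.2.1 then d
             else d.modify t.1 PySem.Set.empty (fun s => s.add t.2.1)) PySem.Dict.empty,
         (m.filterMap (fun kv => (pvParse? kv.1).map (fun pg => (pg.1, pg.2, kv.2)))).foldl
           (fun d t => d.insert t.1 (d.getD t.1 0 + t.2.2)) PySem.Dict.empty) := by
    rw [List.foldl_filterMap, List.foldl_filterMap, ← PySem.List.foldl_prod_mk]
    congr 1
    funext st kv
    cases h : pvParse? kv.1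
    · simp
    · simp
  simp only [summarize_matrix_with_per_pixel, summarize_matrix_with_per_pixel_alt, h1]
  exact Prod.ext (pv_genes_items _) (pv_count_items _)

-- ===== VERDICT (by name: the statement is the Claim_ definition above) =====
theorem summarize_matrix_with_per_pixel_spec : Claim_equal_summarize_matrix_with_per_pixel := by
  intro matrix _ _
  unfold Spec_summarize_matrix_with_per_pixel
  exact pv_ports_eq matrix
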